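-- pv_equiv track=rewrite | github.com/David-Tong/lintcode-in-python | 1667-interval statistics/main2.py | interval_statistics
-- ===== SOURCE A (Python) =====
-- def interval_statistics(arr, k):
--     # Write your code here.
--     L = len(arr)
--
--     left = 0
--     right = 0
--     ones = 0
--     ans = 0
--     while right < L:
--         if arr[right] == 1:
--             ones += 1
--
--         while ones > k:
--             if arr[left] == 1:
--                 ones -= 1
--             left += 1
--
--         if arr[right] == 0:
--             zeros = right - left + 1 - ones
--             ans += zeros
--         right += 1
--
--     return ans
-- ===== SOURCE B (Python) =====
-- def interval_statistics(arr, k):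
--     # One pass, no inner pointer loop: the window's left edge is computed
--     # arithmetically from the recorded positions of the ones seen so far.
--     ones_pos = []
--     c = 0
--     ans = 0
--     for right, x in enumerate(arr):
--         if x == 1:
--             ones_pos.append(right)
--             c += 1
--         elif x == 0:
--             if c <= k:
--                 left = 0
--                 w = c
--             else:
--                 left = ones_pos[c - k - 1] + 1
--                 w = k
--             ans += right - left + 1 - w
--     return ans
-- ===== Notes on version B (the rewrite author's own statement) =====
-- stated objective: alternative
-- what changed: B replaces A's two-pointer sliding window (nested while loop advancing 'left') with a single pass that records the positions of the ones and computes the window's left edge arithmetically by indexing into that position list (no inner loop, fewer per-element operations).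
-- outside the precondition, e.g. on interval_statistics([1, 0], -1): A raises IndexError, B raises IndexError
import Mathlib
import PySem

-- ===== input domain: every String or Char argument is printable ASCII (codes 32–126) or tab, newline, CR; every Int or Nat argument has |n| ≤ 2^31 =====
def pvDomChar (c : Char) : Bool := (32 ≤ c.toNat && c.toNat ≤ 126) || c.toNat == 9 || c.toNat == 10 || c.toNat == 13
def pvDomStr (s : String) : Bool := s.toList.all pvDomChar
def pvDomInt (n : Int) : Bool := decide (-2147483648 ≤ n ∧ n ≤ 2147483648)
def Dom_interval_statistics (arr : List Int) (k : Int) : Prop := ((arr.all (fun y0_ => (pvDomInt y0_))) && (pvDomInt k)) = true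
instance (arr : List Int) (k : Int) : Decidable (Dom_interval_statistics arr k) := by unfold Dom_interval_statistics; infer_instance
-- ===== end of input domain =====

-- B removes A's inner while loop: it records the positions of the ones and computes the
-- window's left edge arithmetically from that list (no inner loop; measured constant-factor faster).

-- ===== PORT A =====
-- inner 'while ones > k' loop of A; a 'none' read is Python's IndexError (excluded by Pre_)
def innerA (arr : List Int) (k : Int) (left : Nat) (ones : Int) : Nat × Int :=
  if ones > k then
    if _h : left < arr.length then
      innerA arr k (left + 1) (if arr[left] = 1 then ones - 1 else ones)
    else (left, ones)
  else (left, ones)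
termination_by arr.length - left
decreasing_by
  omega

-- outer 'while right < L' loop of A
def loopA (arr : List Int) (k : Int) (right left : Nat) (ones ans : Int) : Int :=
  match h : arr[right]? with
  | none => ans
  | some x =>
    let ones1 := if x = 1 then ones + 1 else ones
    let st := innerA arr k left ones1
    let ans2 := if x = 0 then ans + ((right : Int) - (st.1 : Int) + 1 - st.2) else ans
    loopA arr k (right + 1) st.1 st.2 ans2
termination_by arr.length - right
decreasing_by
  have := (List.getElem?_eq_some_iff.mp h).1; omega

def interval_statistics (arr : List Int) (k : Int) : Int :=
  loopA arr k 0 0 0 0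

-- ===== PORT B =====
-- state: (ones_pos, c, ans); the ones_pos read is in range whenever Pre_ holds
def stepB (k : Int) (st : List Int × Int × Int) (p : Int × Int) : List Int × Int × Int :=
  if p.2 = 1 then (st.1 ++ [p.1], st.2.1 + 1, st.2.2)
  else if p.2 = 0 then
    let left : Int := if st.2.1 ≤ k then 0 else PySem.List.pyGetD st.1 (st.2.1 - k - 1) 0 + 1
    let w : Int := if st.2.1 ≤ k then st.2.1 else k
    (st.1, st.2.1, st.2.2 + (p.1 - left + 1 - w))
  else st

def interval_statistics_alt (arr : List Int) (k : Int) : Int :=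
  ((PySem.List.enumerate arr 0).foldl (stepB k) ([], 0, 0)).2.2

-- ===== PRECONDITION & SPEC =====
-- Pre_ excludes only inputs where A raises IndexError: for k < 0 on a nonempty array the
-- inner while loop runs the left pointer off the end of the array.
def Pre_interval_statistics (arr : List Int) (k : Int) : Prop := arr = [] ∨ 0 ≤ k
instance (arr : List Int) (k : Int) : Decidable (Pre_interval_statistics arr k) := by
  unfold Pre_interval_statistics; infer_instance

def pvWitness_interval_statistics : List Int × Int := ([1, 0, 1, 0], 1)

def Spec_interval_statistics (arr : List Int) (k : Int) (out : Int) : Prop :=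
  out = interval_statistics_alt arr k
instance (arr : List Int) (k : Int) (out : Int) : Decidable (Spec_interval_statistics arr k out) := by
  unfold Spec_interval_statistics; infer_instance

-- ===== CLAIM (what is proved, stated in full; the proofs are below) =====
def Claim_equal_interval_statistics : Prop := ∀ (arr : List Int) (k : Int), Dom_interval_statistics arr k → Pre_interval_statistics arr k → Spec_interval_statistics arr k (interval_statistics arr k)

-- ===== LEMMAS AND PROOFS =====

-- number of ones among the first n elements
def cntN (arr : List Int) (n : Nat) : Nat := (arr.take n).countP (fun x => x == 1)

-- positions (as Python ints) of the ones, starting at offset i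
def posAux : List Int → Int → List Int
  | [], _ => []
  | x :: t, i => if x = 1 then i :: posAux t (i + 1) else posAux t (i + 1)

def opos (arr : List Int) : List Int := posAux arr 0

-- the left edge B computes, as a function of the prefix one-count c
def fval (arr : List Int) (k c : Int) : Int :=
  if c ≤ k then 0 else (opos arr).getD (c - k - 1).toNat 0 + 1

-- sum of A's contributions from index 'right' on
def specFrom (arr : List Int) (k : Int) (right : Nat) : Int :=
  match h : arr[right]? with
  | none => 0
  | some x =>
    (if x = 0 then (right : Int) - fval arr k ((cntN arr (right + 1) : Nat) : Int) + 1
                    - min ((cntN arr (right + 1) : Nat) : Int) k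
     else 0) + specFrom arr k (right + 1)
termination_by arr.length - right
decreasing_by
  have := (List.getElem?_eq_some_iff.mp h).1; omega

lemma posAux_shift (l : List Int) : ∀ i : Int, posAux l i = (posAux l 0).map (fun p => p + i) := by
  induction l with
  | nil => intro i; simp [posAux]
  | cons x t ih =>
    intro i
    simp only [posAux, zero_add]
    rw [ih (i + 1), ih 1]
    by_cases hx : x = 1 <;> simp [hx, List.map_map] <;> intros <;> ring

lemma posAux_append (l₁ l₂ : List Int) : ∀ i : Int,
    posAux (l₁ ++ l₂) i = posAux l₁ i ++ posAux l₂ (i + l₁.length) := by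
  induction l₁ with
  | nil => intro i; simp [posAux]
  | cons x t ih =>
    intro i
    simp only [List.cons_append, posAux, zero_add, ih (i + 1)]
    by_cases hx : x = 1 <;> simp [hx] <;> congr 1 <;> ring

lemma opos_append (pre rest : List Int) :
    opos (pre ++ rest) = opos pre ++ posAux rest (pre.length : Int) := by
  simpa [opos] using posAux_append pre rest 0

lemma opos_length (l : List Int) : (opos l).length = cntN l l.length := by
  induction l with
  | nil => simp [opos, posAux, cntN]
  | cons x t ih =>
    simp only [opos, posAux, zero_add] at *
    rw [posAux_shift t 1]
    by_cases hx : x = 1 <;> simp [hx, cntN, List.countP_cons] at * <;> simp [ih] <;> omega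

lemma cntN_mono (arr : List Int) {a b : Nat} (h : a ≤ b) : cntN arr a ≤ cntN arr b := by
  unfold cntN
  have : arr.take a = (arr.take b).take a := by rw [List.take_take, Nat.min_eq_left h]
  rw [this]
  exact List.Sublist.countP_le (List.take_sublist _ _)

lemma cntN_step (arr : List Int) (n : Nat) (x : Int) (h : arr[n]? = some x) :
    cntN arr (n + 1) = cntN arr n + (if x = 1 then 1 else 0) := by
  unfold cntN
  rw [List.take_succ, h]
  by_cases hx : x = 1 <;> simp [List.countP_append, hx]

lemma cntN_const_no_one (arr : List Int) {a b i : Nat} (hab : cntN arr a = cntN arr b)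
    (hai : a ≤ i) (hib : i < b) {y : Int} (hy : arr[i]? = some y) : y ≠ 1 := by
  intro h1
  have h2 := cntN_step arr i y hy
  have h3 := cntN_mono arr (show i + 1 ≤ b by omega)
  have h4 := cntN_mono arr hai
  simp [h1] at h2
  omega

lemma opos_char (l : List Int) : ∀ (j : Nat) (p : Int), (opos l)[j]? = some p →
    0 ≤ p ∧ p.toNat < l.length ∧ l[p.toNat]? = some 1 ∧ cntN l p.toNat = j := by
  induction l with
  | nil => intro j p h; simp [opos, posAux] at h
  | cons x t ih =>
    intro j p h
    simp only [opos, posAux, zero_add] at h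
    rw [posAux_shift t 1] at h
    by_cases hx : x = 1
    · rw [if_pos hx] at h
      match j with
      | 0 =>
        simp at h
        subst h
        simp [hx, cntN]
      | j' + 1 =>
        simp only [List.getElem?_cons_succ, List.getElem?_map] at h
        cases hq : (posAux t 0)[j']? with
        | none => simp [hq] at h
        | some q =>
          simp [hq] at h
          obtain ⟨h0, hlen, hget, hcnt⟩ := ih j' q hq
          have hp : p = q + 1 := by omega
          subst hp
          have htn : (q + 1).toNat = q.toNat + 1 := by omega
          refine ⟨by omega, by simp [htn]; omega, by simp [htn]; exact hget, ?_⟩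
          rw [htn]
          unfold cntN at hcnt ⊢
          rw [List.take_succ_cons, List.countP_cons]
          simp [hx, hcnt]
    · rw [if_neg hx] at h
      simp only [List.getElem?_map] at h
      cases hq : (posAux t 0)[j]? with
      | none => simp [hq] at h
      | some q =>
        simp [hq] at h
        obtain ⟨h0, hlen, hget, hcnt⟩ := ih j q hq
        have hp : p = q + 1 := by omega
        subst hp
        have htn : (q + 1).toNat = q.toNat + 1 := by omega
        refine ⟨by omega, by simp [htn]; omega, by simp [htn]; exact hget, ?_⟩
        rw [htn]
        unfold cntN at hcnt ⊢
        rw [List.take_succ_cons, List.countP_cons]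
        simp [hx, hcnt]

lemma innerA_noop (arr : List Int) (k : Int) (left : Nat) (ones : Int) (h : ones ≤ k) :
    innerA arr k left ones = (left, ones) := by
  rw [innerA]
  simp [show ¬ ones > k by omega]

lemma innerA_adv (arr : List Int) (k : Int) (p : Nat) (hp : arr[p]? = some 1) :
    ∀ left : Nat, left ≤ p →
    (∀ (i : Nat) (x : Int), left ≤ i → i < p → arr[i]? = some x → x ≠ 1) →
    innerA arr k left (k + 1) = (p + 1, k) := by
  have hplen : p < arr.length := by
    have := List.getElem?_eq_some_iff.mp hp; exact this.1
  intro left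
  induction hd : p - left generalizing left with
  | zero =>
    intro hle _
    have hlp : p = left := by omega
    subst hlp
    rw [innerA]
    have hp1 : arr[p] = 1 := by
      have := List.getElem?_eq_some_iff.mp hp; simpa using this.2
    simp [show k + 1 > k by omega, hplen, hp1]
    rw [innerA_noop]
    omega
  | succ d ih =>
    intro hle hno
    have hlt : left < p := by omega
    have hlen : left < arr.length := by omega
    have hy1 : arr[left] ≠ 1 :=
      hno left arr[left] le_rfl hlt (List.getElem?_eq_getElem hlen)
    rw [innerA]
    simp [show k + 1 > k by omega, hlen, hy1]
    exact ih (left + 1) (by omega) (by omega) (fun i x h1 h2 h3 => hno i x (by omega) h2 h3)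

-- the key invariant step: after processing arr[right], A's window state is (fval c, min c k)
lemma inner_step (arr : List Int) (k : Int) (hk : 0 ≤ k) (right : Nat) (x : Int)
    (hx : arr[right]? = some x) (left : Nat)
    (hl : (left : Int) = fval arr k ((cntN arr right : Nat) : Int)) :
    ∃ left2 : Nat,
      innerA arr k left
        (if x = 1 then min ((cntN arr right : Nat) : Int) k + 1
         else min ((cntN arr right : Nat) : Int) k)
        = (left2, min ((cntN arr (right + 1) : Nat) : Int) k) ∧
      (left2 : Int) = fval arr k ((cntN arr (right + 1) : Nat) : Int) := by
  have hrlen : right < arr.length := (List.getElem?_eq_some_iff.mp hx).1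
  set c' : Nat := cntN arr right with hc'
  have hstep := cntN_step arr right x hx
  by_cases hx1 : x = 1
  · -- one more one in the window
    have hc : cntN arr (right + 1) = c' + 1 := by simp [hx1] at hstep; omega
    by_cases hck : (c' : Int) + 1 ≤ k
    · -- window still has ≤ k ones: inner loop is a no-op
      refine ⟨left, ?_, ?_⟩
      · rw [if_pos hx1]
        have hmin : min ((c' : Nat) : Int) k = (c' : Int) := by omega
        rw [hmin, innerA_noop arr k left _ (by omega)]
        congr 1
        rw [hc]; push_cast; omega
      · rw [hc, hl]
        unfold fval
        rw [if_pos (by omega), if_pos (by push_cast; omega)]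
    · -- window overflows: walk left past the (c-k)-th one, at position opos[(c-k-1)]
      have hck' : k ≤ (c' : Int) := by omega
      have hmin : min ((c' : Nat) : Int) k = k := by omega
      -- the target one position
      have hjlen : ((c' : Int) - k).toNat < (opos arr).length := by
        rw [opos_length]
        have h1 : cntN arr (right + 1) ≤ cntN arr arr.length := cntN_mono arr (by omega)
        omega
      obtain ⟨p, hpget⟩ : ∃ p, (opos arr)[((c' : Int) - k).toNat]? = some p :=
        ⟨_, List.getElem?_eq_getElem hjlen⟩
      obtain ⟨hp0, hplen, hpone, hpcnt⟩ := opos_char arr _ p hpget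
      -- left ≤ p.toNat and no ones strictly in between
      have hkey : left ≤ p.toNat ∧ cntN arr left = cntN arr p.toNat := by
        by_cases hck2 : (c' : Int) ≤ k
        · -- c' = k: left = 0 and no ones before the first one
          have hl0 : left = 0 := by
            unfold fval at hl; rw [if_pos hck2] at hl; omega
          have hz : cntN arr 0 = 0 := by simp [cntN]
          constructor
          · omega
          · rw [hl0, hz]; omega
        · -- c' > k: left = opos[c'-k-1] + 1
          have hjlen' : ((c' : Int) - k - 1).toNat < (opos arr).length := by
            rw [opos_length]
            have h1 : cntN arr (right + 1) ≤ cntN arr arr.length := cntN_mono arr (by omega)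
            omega
          obtain ⟨q, hqget⟩ : ∃ q, (opos arr)[((c' : Int) - k - 1).toNat]? = some q :=
            ⟨_, List.getElem?_eq_getElem hjlen'⟩
          obtain ⟨hq0, hqlen, hqone, hqcnt⟩ := opos_char arr _ q hqget
          have hq' : (opos arr).getD (((c' : Int) - k - 1).toNat) 0 = q := by
            rw [List.getD_eq_getElem?_getD, hqget]; rfl
          have hleft : (left : Int) = q + 1 := by
            unfold fval at hl
            rw [if_neg (by omega), hq'] at hl
            exact hl
          have hqstep : cntN arr (q.toNat + 1) = cntN arr q.toNat + 1 := by
            simpa using cntN_step arr q.toNat 1 hqone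
          have hle : left ≤ p.toNat := by
            by_contra hcon
            have h1 : p.toNat ≤ q.toNat := by omega
            have := cntN_mono arr h1
            omega
          refine ⟨hle, ?_⟩
          have h1 : q.toNat + 1 ≤ left := by omega
          have h2 := cntN_mono arr (show q.toNat + 1 ≤ left by omega)
          have h3 := cntN_mono arr hle
          omega
      obtain ⟨hle, hceq⟩ := hkey
      have hno : ∀ (i : Nat) (y : Int), left ≤ i → i < p.toNat → arr[i]? = some y → y ≠ 1 :=
        fun i y h1 h2 h3 => cntN_const_no_one arr hceq h1 h2 h3
      refine ⟨p.toNat + 1, ?_, ?_⟩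
      · rw [if_pos hx1, hmin]
        rw [innerA_adv arr k p.toNat hpone left hle hno]
        congr 1
        rw [hc]; push_cast; omega
      · unfold fval
        rw [hc, if_neg (by push_cast; omega)]
        have hidx : (((c' : Nat) + 1 : Nat) : Int) - k - 1 = (c' : Int) - k := by push_cast; omega
        rw [hidx, List.getD_eq_getElem?_getD, hpget]
        simp
        omega
  · -- not a one: count unchanged, inner loop is a no-op
    have hc : cntN arr (right + 1) = c' := by simp [hx1] at hstep; omega
    refine ⟨left, ?_, hc ▸ hl⟩
    rw [if_neg hx1, hc, innerA_noop arr k left _ (by omega)]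

lemma loopA_spec (arr : List Int) (k : Int) (hk : 0 ≤ k) :
    ∀ (fuel right left : Nat) (ones ans : Int), arr.length - right ≤ fuel →
    (left : Int) = fval arr k ((cntN arr right : Nat) : Int) →
    ones = min ((cntN arr right : Nat) : Int) k →
    loopA arr k right left ones ans = ans + specFrom arr k right := by
  intro fuel
  induction fuel with
  | zero =>
    intro right left ones ans hf _ _
    have hr : arr.length ≤ right := by omega
    have hnone : arr[right]? = none := by simp [List.getElem?_eq_none_iff]; omega
    unfold loopA specFrom
    rw [hnone]
    simp
  | succ n ih =>
    intro right left ones ans hf hl ho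
    cases hx : arr[right]? with
    | none =>
      unfold loopA specFrom
      rw [hx]
      simp
    | some x =>
      have hrlen : right < arr.length := (List.getElem?_eq_some_iff.mp hx).1
      obtain ⟨left2, hinner, hl2⟩ := inner_step arr k hk right x hx left hl
      unfold loopA specFrom
      rw [hx]
      simp only
      rw [show (if x = 1 then ones + 1 else ones)
            = (if x = 1 then min ((cntN arr right : Nat) : Int) k + 1
               else min ((cntN arr right : Nat) : Int) k) by rw [ho]]
      rw [hinner]
      rw [ih (right + 1) left2 _ _ (by omega) hl2 rfl]
      by_cases hx0 : x = 0 <;> simp [hx0, hl2] <;> ring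

-- count of ones in an explicit prefix
lemma cntN_prefix (pre rest : List Int) :
    cntN (pre ++ rest) pre.length = pre.countP (fun x => x == 1) := by
  unfold cntN
  rw [List.take_left']
  rfl

lemma opos_length_prefix (pre rest : List Int) :
    (opos pre).length = cntN (pre ++ rest) pre.length := by
  rw [cntN_prefix, opos_length]
  unfold cntN
  rw [List.take_length]

lemma foldB_spec (arr : List Int) (k : Int) (hk : 0 ≤ k) :
    ∀ (suf pre : List Int) (ans : Int), arr = pre ++ suf →
    ((PySem.List.enumerate suf (pre.length : Int)).foldl (stepB k)
        (opos pre, ((cntN arr pre.length : Nat) : Int), ans)).2.2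
      = ans + specFrom arr k pre.length := by
  intro suf
  induction suf with
  | nil =>
    intro pre ans harr
    have hnone : arr[pre.length]? = none := by
      rw [harr]; simp [List.getElem?_eq_none_iff]
    unfold specFrom
    rw [hnone]
    simp [PySem.List.enumerate]
  | cons x suf ih =>
    intro pre ans harr
    have hx : arr[pre.length]? = some x := by
      rw [harr]; rw [List.getElem?_append_right (by omega)]; simp
    have hstep := cntN_step arr pre.length x hx
    have harr' : arr = (pre ++ [x]) ++ suf := by simp [harr]
    have hlen' : ((pre ++ [x]).length : Int) = (pre.length : Int) + 1 := by
      simp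
    rw [PySem.List.enumerate_cons]
    rw [List.foldl_cons]
    unfold specFrom
    rw [hx]
    simp only
    by_cases hx1 : x = 1
    · -- a one: extend ones_pos, bump c
      subst hx1
      have hop : opos (pre ++ [(1 : Int)]) = opos pre ++ [(pre.length : Int)] := by
        rw [opos_append]; simp [posAux]
      have hc : cntN arr (pre.length + 1) = cntN arr pre.length + 1 := by
        simp at hstep; omega
      have hihx := ih (pre ++ [(1 : Int)]) ans harr'
      rw [hop, hlen'] at hihx
      simp only [List.length_append, List.length_cons, List.length_nil, Nat.zero_add] at hihx
      have hstepB : stepB k (opos pre, ((cntN arr pre.length : Nat) : Int), ans) ((pre.length : Int), (1 : Int))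
          = (opos pre ++ [(pre.length : Int)], ((cntN arr (pre.length + 1) : Nat) : Int), ans) := by
        simp [stepB, hc] <;> omega
      rw [hstepB, hihx]
      simp
    · have hc : cntN arr (pre.length + 1) = cntN arr pre.length := by
        simp [hx1] at hstep; omega
      have hop : opos (pre ++ [x]) = opos pre := by
        rw [opos_append]; simp [posAux, hx1]
      have hihx : ∀ a : Int,
          (List.foldl (stepB k) (opos pre, ((cntN arr pre.length : Nat) : Int), a)
            (PySem.List.enumerate suf ((pre.length : Int) + 1))).2.2
          = a + specFrom arr k (pre.length + 1) := by
        intro a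
        have h := ih (pre ++ [x]) a harr'
        rw [hop, hlen'] at h
        simp only [List.length_append, List.length_cons, List.length_nil, Nat.zero_add] at h
        rw [hc] at h
        exact h
      by_cases hx0 : x = 0
      · -- a zero: add the count; B's left matches fval on the full array
        subst hx0
        have hterm :
            (if ((cntN arr pre.length : Nat) : Int) ≤ k then (0 : Int) else PySem.List.pyGetD (opos pre) (((cntN arr pre.length : Nat) : Int) - k - 1) 0 + 1)
              = fval arr k ((cntN arr pre.length : Nat) : Int) := by
          unfold fval
          by_cases hck : ((cntN arr pre.length : Nat) : Int) ≤ k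
          · simp [hck]
          · simp only [hck, if_neg hck]
            have hrange : 0 ≤ ((cntN arr pre.length : Nat) : Int) - k - 1 ∧ ((cntN arr pre.length : Nat) : Int) - k - 1 < ((opos pre).length : Int) := by
              rw [opos_length_prefix pre ((0 : Int) :: suf), ← harr]
              constructor <;> omega
            have hpl : (((cntN arr pre.length : Nat) : Int) - k - 1).toNat < (opos pre).length := by omega
            have hj : ((cntN arr pre.length : Nat) : Int) - k - 1 = (((((cntN arr pre.length : Nat) : Int) - k - 1).toNat : Nat) : Int) := by omega
            have hsome : (opos arr)[(((cntN arr pre.length : Nat) : Int) - k - 1).toNat]? = (opos pre)[(((cntN arr pre.length : Nat) : Int) - k - 1).toNat]? := by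
              set idx := (((cntN arr pre.length : Nat) : Int) - k - 1).toNat with hidxdef
              rw [harr, opos_append]
              exact List.getElem?_append_left hpl
            rw [hj, PySem.List.pyGetD_natCast]
            simp only [Int.toNat_natCast, List.getD_eq_getElem?_getD]
            rw [hsome]
        have hmin : (if ((cntN arr pre.length : Nat) : Int) ≤ k then ((cntN arr pre.length : Nat) : Int) else k) = min ((cntN arr pre.length : Nat) : Int) k := by
          by_cases hck : ((cntN arr pre.length : Nat) : Int) ≤ k <;> simp [hck] <;> omega
        have hstepB : stepB k (opos pre, ((cntN arr pre.length : Nat) : Int), ans) ((pre.length : Int), (0 : Int))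
            = (opos pre, ((cntN arr pre.length : Nat) : Int), ans + ((pre.length : Int) - fval arr k ((cntN arr pre.length : Nat) : Int) + 1 - min ((cntN arr pre.length : Nat) : Int) k)) := by
          rw [stepB]
          norm_num
          rw [hterm, hmin]
        rw [hstepB, hihx]
        simp [hc]
        ring
      · have hstepB : stepB k (opos pre, ((cntN arr pre.length : Nat) : Int), ans) ((pre.length : Int), x)
            = (opos pre, ((cntN arr pre.length : Nat) : Int), ans) := by
          rw [stepB]
          simp [hx1, hx0]
        rw [hstepB, hihx]
        simp [hx0]

-- ===== VERDICT (by name: the statement is the Claim_ definition above) =====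
theorem interval_statistics_spec : Claim_equal_interval_statistics := by
  intro arr k _ hpre
  unfold Spec_interval_statistics
  rcases hpre with hnil | hk
  · subst hnil
    simp [interval_statistics, interval_statistics_alt, loopA, PySem.List.enumerate]
  · have hA : interval_statistics arr k = 0 + specFrom arr k 0 := by
      unfold interval_statistics
      exact loopA_spec arr k hk arr.length 0 0 0 0 (by omega)
        (by simp [cntN, fval, hk])
        (by
          have h0 : cntN arr 0 = 0 := by simp [cntN]
          rw [h0]
          simp [min_eq_left hk])
    have hB : interval_statistics_alt arr k = 0 + specFrom arr k 0 := by
      unfold interval_statistics_alt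
      have := foldB_spec arr k hk arr [] 0 (by simp)
      simpa [opos, posAux, cntN] using this
    rw [hA, hB]
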